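-- pv_equiv track=rewrite | github.com/onikw/Owner-avatar-Introduction_to_computer_science_course | Zestaw3/z12.py | najdcr
-- ===== SOURCE A (Python) =====
-- def najdcr(tab):
--     r=tab[1]-tab[0]
--     dl=2
--     maksdl=0
--     for i in range(2,len(tab)):
--         if tab[i]-tab[i-1]==r and r>0:
--             dl+=1
--             maksdl=max(maksdl,dl)
--
--         else:
--             dl=2
--             r=tab[i]-tab[i-1]
--     return maksdl
-- ===== SOURCE B (Python) =====
-- def najdcr(tab):
--     diffs = [tab[i] - tab[i - 1] for i in range(1, len(tab))]
--     best = 0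
--     i = 0
--     n = len(diffs)
--     while i < n:
--         j = i
--         while j < n and diffs[j] == diffs[i]:
--             j += 1
--         L = j - i
--         if diffs[i] > 0 and L >= 2:
--             best = max(best, L + 1)
--         i = j
--     return best
-- ===== Notes on version B (the rewrite author's own statement) =====
-- stated objective: alternative
-- what changed: A keeps a running (current-diff, run-length, best) state updated element by element; B first builds the difference array in one comprehension and then scans it group by group (explicit run-length grouping), taking L+1 for each maximal group of a positive difference with length >= 2.
-- crash fix: On lists of length < 2 A raises IndexError (it reads tab[1]); B's difference array is empty there and B returns 0. — e.g. on najdcr([5]): A raises IndexError, B returns 0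
import Mathlib
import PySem

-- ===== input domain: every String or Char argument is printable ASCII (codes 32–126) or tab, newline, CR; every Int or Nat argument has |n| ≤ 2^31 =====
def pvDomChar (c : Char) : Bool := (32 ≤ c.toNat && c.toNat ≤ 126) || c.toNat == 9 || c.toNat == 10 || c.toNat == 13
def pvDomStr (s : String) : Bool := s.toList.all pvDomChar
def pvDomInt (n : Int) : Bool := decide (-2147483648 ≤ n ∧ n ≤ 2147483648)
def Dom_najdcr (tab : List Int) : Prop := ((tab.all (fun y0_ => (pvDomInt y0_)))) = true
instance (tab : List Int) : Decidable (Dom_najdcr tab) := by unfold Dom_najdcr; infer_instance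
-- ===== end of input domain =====

-- B replaces A's inline running-state scan by a two-phase pass (build the difference
-- array, then scan it group by group); same O(n) cost, objective: alternative.

-- ===== PORT A =====
def najdcr (tab : List Int) : Int :=
  ((PySem.List.pyRange 2 (tab.length : Int) 1).foldl
    (fun (s : Int × Int × Int) i =>
      if PySem.List.pyGetD tab i 0 - PySem.List.pyGetD tab (i - 1) 0 = s.1 ∧ s.1 > 0 then
        (s.1, s.2.1 + 1, max s.2.2 (s.2.1 + 1))
      else (PySem.List.pyGetD tab i 0 - PySem.List.pyGetD tab (i - 1) 0, 2, s.2.2))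
    (PySem.List.pyGetD tab 1 0 - PySem.List.pyGetD tab 0 0, 2, 0)).2.2

-- ===== PORT B =====
-- length of the leading run of value v (B's inner `while j < n and diffs[j] == diffs[i]` scan)
def pvRunLen (v : Int) : List Int → Nat
  | [] => 0
  | d :: rest => if d = v then pvRunLen v rest + 1 else 0

-- B's outer while loop: consume one maximal group at a time, tracking `best`
def pvGroups : List Int → Int → Int
  | [], best => best
  | d :: rest, best =>
      pvGroups (rest.drop (pvRunLen d rest))
        (if d > 0 ∧ ((pvRunLen d rest : Int) + 1) ≥ 2
         then max best ((pvRunLen d rest : Int) + 1 + 1) else best)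
termination_by l _ => l.length
decreasing_by simp

def najdcr_alt (tab : List Int) : Int :=
  pvGroups ((PySem.List.pyRange 1 (tab.length : Int) 1).map
    (fun i => PySem.List.pyGetD tab i 0 - PySem.List.pyGetD tab (i - 1) 0)) 0

-- ===== PRECONDITION & SPEC =====
-- A reads tab[1] unconditionally: lists of length < 2 raise IndexError, so they are outside Pre_.
def Pre_najdcr (tab : List Int) : Prop := 2 ≤ tab.length
instance (tab : List Int) : Decidable (Pre_najdcr tab) := by unfold Pre_najdcr; infer_instance
def pvWitness_najdcr : List Int := [1, 2, 3]

-- On lists of length < 2 A raises IndexError (it reads tab[1]); B's difference array is empty there and B returns 0.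
def Raises_najdcr (tab : List Int) : Prop := tab.length ≤ 1
instance (tab : List Int) : Decidable (Raises_najdcr tab) := by unfold Raises_najdcr; infer_instance
def pvRaiseWitness_najdcr : List Int := [5]
def pvRaiseWitnessOut_najdcr : Int := 0

def Spec_najdcr (tab : List Int) (out : Int) : Prop := out = najdcr_alt tab
instance (tab : List Int) (out : Int) : Decidable (Spec_najdcr tab out) := by unfold Spec_najdcr; infer_instance

-- ===== CLAIM (what is proved, stated in full; the proofs are below) =====
def Claim_equal_najdcr : Prop := ∀ (tab : List Int), Dom_najdcr tab → Pre_najdcr tab → Spec_najdcr tab (najdcr tab)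
def Claim_raises_najdcr : Prop := (∀ (tab : List Int), Dom_najdcr tab → Raises_najdcr tab → ¬ Pre_najdcr tab) ∧ (Dom_najdcr (pvRaiseWitness_najdcr) ∧ Raises_najdcr (pvRaiseWitness_najdcr) ∧ najdcr_alt (pvRaiseWitness_najdcr) = pvRaiseWitnessOut_najdcr)

-- ===== LEMMAS AND PROOFS =====

-- unfolding equations for the well-founded recursion pvGroups
theorem pvGroups_nil (best : Int) : pvGroups [] best = best := by rw [pvGroups.eq_def]

theorem pvGroups_cons (d : Int) (rest : List Int) (best : Int) :
    pvGroups (d :: rest) best = pvGroups (rest.drop (pvRunLen d rest))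
      (if d > 0 ∧ ((pvRunLen d rest : Int) + 1) ≥ 2
       then max best ((pvRunLen d rest : Int) + 1 + 1) else best) := by rw [pvGroups.eq_def]

-- Core invariant: A's running fold over the remaining diffs ds, started in a state that has
-- already seen j+1 consecutive copies of v (dl = j+2, best-so-far m), equals B's
-- group-by-group scan of what is left after the current group.
theorem pv_grp (ds : List Int) : ∀ (v m : Int) (j : Nat),
    (ds.foldl
      (fun (s : Int × Int × Int) d =>
        if d = s.1 ∧ s.1 > 0 then (s.1, s.2.1 + 1, max s.2.2 (s.2.1 + 1))
        else (d, 2, s.2.2))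
      (v, (j : Int) + 2, m)).2.2
    = pvGroups (ds.drop (pvRunLen v ds))
        (if v > 0 ∧ 1 ≤ pvRunLen v ds
         then max m ((j : Int) + (pvRunLen v ds : Int) + 2) else m) := by
  induction ds with
  | nil =>
    intro v m j
    simp only [List.foldl_nil, List.drop_nil, pvRunLen]
    rw [if_neg (by omega), pvGroups_nil]
  | cons d rest ih =>
    intro v m j
    simp only [List.foldl_cons]
    by_cases hd : d = v
    · subst hd
      by_cases hv : d > 0
      · rw [if_pos ⟨rfl, hv⟩]
        have e : ((j : Int) + 2) + 1 = ((j + 1 : Nat) : Int) + 2 := by push_cast; ring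
        rw [e, ih d (max m (((j + 1 : Nat) : Int) + 2)) (j + 1)]
        simp only [pvRunLen, if_true, List.drop_succ_cons]
        congr 1
        simp only [max_def]
        split_ifs <;> omega
      · rw [if_neg (fun h : _ ∧ _ => hv h.2)]
        rw [show ((d, (2:Int), ((d:Int), (j:Int)+2, m).2.2) : Int × Int × Int) = (d, ((0:Nat):Int)+2, m) from rfl,
            ih d m 0]
        simp only [pvRunLen, if_true, List.drop_succ_cons]
        congr 1
        simp only [max_def]
        split_ifs <;> omega
    · rw [if_neg (fun h : _ ∧ _ => hd h.1)]
      rw [show ((d, (2:Int), ((v:Int), (j:Int)+2, m).2.2) : Int × Int × Int) = (d, ((0:Nat):Int)+2, m) from rfl,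
          ih d m 0]
      simp only [pvRunLen, if_neg hd, List.drop_zero]
      conv_rhs => rw [if_neg (show ¬(v > 0 ∧ 1 ≤ (0:Nat)) by omega), pvGroups_cons]
      congr 1
      simp only [max_def]
      split_ifs <;> omega

-- ===== VERDICT (by name: the statement is the Claim_ definition above) =====
theorem najdcr_spec : Claim_equal_najdcr := by
  intro tab _ hpre
  unfold Spec_najdcr najdcr najdcr_alt
  have h1 : (1 : Int) < (tab.length : Int) := by exact_mod_cast hpre
  rw [PySem.List.pyRange_one_cons h1, List.map_cons]
  have key := pv_grp ((PySem.List.pyRange (1+1) (tab.length : Int) 1).map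
      (fun i => PySem.List.pyGetD tab i 0 - PySem.List.pyGetD tab (i - 1) 0))
    (PySem.List.pyGetD tab 1 0 - PySem.List.pyGetD tab (1 - 1) 0) 0 0
  rw [List.foldl_map] at key
  norm_num at key ⊢
  rw [key, pvGroups_cons]
  congr 1
  simp only [max_def]
  split_ifs <;> omega

theorem najdcr_raises : Claim_raises_najdcr := by
  unfold Claim_raises_najdcr
  refine ⟨fun tab _ hr hp => ?_, by decide, by decide, ?_⟩
  · unfold Raises_najdcr at hr; unfold Pre_najdcr at hp; omega
  · show najdcr_alt [5] = 0
    unfold najdcr_alt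
    rw [show (([5] : List Int).length : Int) = 1 from rfl,
        PySem.List.pyRange_one_eq_nil (le_refl 1), List.map_nil, pvGroups_nil]

-- self-check that the recorded raise-witness output is indeed B's port's value there
theorem pvRaiseWitnessOut_ok : najdcr_alt pvRaiseWitness_najdcr = pvRaiseWitnessOut_najdcr :=
  najdcr_raises.2.2.2
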